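-- pv_equiv track=rewrite | github.com/0395ankit/Django_HR | try.py | fn
-- ===== SOURCE A (Python) =====
-- def fn(n):
--     count = 0
--     for i in range(1,n+1):
--         for j in range(1,n+1):
--             if(i*i*i == j*j):
--                 if(i<=j):
--                     if(i<n and j<n):
--                        count+=1
--     return count
-- ===== SOURCE B (Python) =====
-- def fn(n):
--     # count k >= 1 with k**3 < n; each such k gives the unique pair (i, j) = (k*k, k**3)
--     count = 0
--     k = 1
--     while k * k * k < n:
--         count += 1
--         k += 1
--     return count
-- ===== Notes on version B (the rewrite author's own statement) =====
-- stated objective: faster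
-- what changed: Instead of scanning all O(n^2) pairs (i,j), B enumerates the solutions of i^3=j^2 directly as (k^2,k^3) and counts k while k^3<n.
import Mathlib
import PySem

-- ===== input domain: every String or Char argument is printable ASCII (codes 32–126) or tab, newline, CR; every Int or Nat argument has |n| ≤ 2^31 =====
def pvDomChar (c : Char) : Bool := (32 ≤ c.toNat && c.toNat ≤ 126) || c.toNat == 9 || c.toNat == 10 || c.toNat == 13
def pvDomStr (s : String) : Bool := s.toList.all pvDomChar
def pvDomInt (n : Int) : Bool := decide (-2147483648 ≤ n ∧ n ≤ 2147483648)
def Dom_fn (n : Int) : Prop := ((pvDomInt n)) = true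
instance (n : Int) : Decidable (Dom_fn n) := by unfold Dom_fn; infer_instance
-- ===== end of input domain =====

-- B replaces A's O(n^2) scan of all pairs by directly counting k ≥ 1 with k^3 < n
-- (each such k is the unique pair (k^2, k^3)); a timing run measures B faster.

-- ===== PORT A =====
def fn (n : Int) : Int :=
  (PySem.List.pyRange 1 (n + 1) 1).foldl (fun count i =>
    (PySem.List.pyRange 1 (n + 1) 1).foldl (fun count j =>
      if i * i * i = j * j then
        if i ≤ j then
          if i < n ∧ j < n then count + 1 else count
        else count
      else count) count) 0

-- ===== PORT B =====
def fnAltLoop (n k count : Int) : Int :=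
  if k * k * k < n then fnAltLoop n (k + 1) (count + 1) else count
termination_by (n - k * k * k).toNat
decreasing_by
  have h1 : k * k * k < (k + 1) * (k + 1) * (k + 1) := by nlinarith [sq_nonneg (2 * k + 1)]
  omega

def fn_alt (n : Int) : Int := fnAltLoop n 1 0

-- ===== PRECONDITION & SPEC =====
def Spec_fn (n : Int) (out : Int) : Prop := out = fn_alt n
instance (n : Int) (out : Int) : Decidable (Spec_fn n out) := by unfold Spec_fn; infer_instance

-- ===== CLAIM (what is proved, stated in full; the proofs are below) =====
def Claim_equal_fn : Prop := ∀ (n : Int), Dom_fn n → Spec_fn n (fn n)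

-- ===== LEMMAS AND PROOFS =====

-- i^3 = j^2 in ℕ forces i = k^2, j = k^3 (gcd argument)
theorem pvExistsSqCubeNat (i j : ℕ) (hi : 0 < i) (h : i ^ 3 = j ^ 2) :
    ∃ k : ℕ, i = k ^ 2 ∧ j = k ^ 3 := by
  set g := Nat.gcd i j with hg
  have hg0 : 0 < g := Nat.gcd_pos_of_pos_left j hi
  have hia : g * (i / g) = i := Nat.mul_div_cancel' (Nat.gcd_dvd_left i j)
  have hjb : g * (j / g) = j := Nat.mul_div_cancel' (Nat.gcd_dvd_right i j)
  set a := i / g with ha'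
  set b := j / g with hb'
  have hco : Nat.Coprime a b := Nat.coprime_div_gcd_div_gcd hg0
  have key : g * a ^ 3 = b ^ 2 := by
    have h2 : (g * a) ^ 3 = (g * b) ^ 2 := by rw [hia, hjb]; exact h
    have h3 : g ^ 2 * (g * a ^ 3) = g ^ 2 * b ^ 2 := by ring_nf; ring_nf at h2; linarith
    exact Nat.eq_of_mul_eq_mul_left (by positivity) h3
  have hdvd : a ^ 3 ∣ b ^ 2 := ⟨g, by rw [← key]; ring⟩
  have ha1 : a ^ 3 = 1 := (Nat.Coprime.pow 3 2 hco).eq_one_of_dvd hdvd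
  have ha : a = 1 := (Nat.pow_eq_one.mp ha1).resolve_right (by omega)
  have hig : i = g := by rw [← hia, ha, mul_one]
  have hgb : g = b ^ 2 := by
    have := key; rw [ha] at this; simpa using this
  exact ⟨b, by rw [hig, hgb], by rw [← hjb, hgb]; ring⟩

-- the Int form on positive i, j, phrased with the products the ports use
theorem pvExistsSqCubeInt (i j : ℤ) (hi : 1 ≤ i) (hj : 1 ≤ j) (h : i * i * i = j * j) :
    ∃ k : ℤ, 1 ≤ k ∧ i = k * k ∧ j = k * k * k := by
  have hi' : ((i.toNat : ℤ)) = i := Int.toNat_of_nonneg (by omega)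
  have hj' : ((j.toNat : ℤ)) = j := Int.toNat_of_nonneg (by omega)
  have hnat : i.toNat ^ 3 = j.toNat ^ 2 := by
    have : ((i.toNat ^ 3 : ℕ) : ℤ) = ((j.toNat ^ 2 : ℕ) : ℤ) := by
      push_cast
      rw [hi', hj']
      ring_nf
      nlinarith [h]
    exact_mod_cast this
  obtain ⟨k, hk1, hk2⟩ := pvExistsSqCubeNat i.toNat j.toNat (by omega) hnat
  refine ⟨(k : ℤ), ?_, ?_, ?_⟩
  · have : 1 ≤ i.toNat := by omega
    have hk0 : k ≠ 0 := by rintro rfl; simp at hk1; omega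
    exact_mod_cast Nat.one_le_iff_ne_zero.mpr hk0
  · rw [← hi']; exact_mod_cast (by rw [hk1]; ring : i.toNat = k * k)
  · rw [← hj']; exact_mod_cast (by rw [hk2]; ring : j.toNat = k * k * k)

-- B's loop counts the k in [k₀, n-1] with k^3 < n
theorem pvFnAltLoop_eq (n : ℤ) : ∀ m k c, (n - k * k * k).toNat = m → 1 ≤ k →
    fnAltLoop n k c = c + (((Finset.Icc k (n - 1)).filter (fun t => t * t * t < n)).card : ℤ) := by
  intro m
  induction m using Nat.strong_induction_on with
  | _ m ih =>
    intro k c hm hk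
    rw [fnAltLoop]
    by_cases hc : k * k * k < n
    · rw [if_pos hc]
      have hkn : k < n := by nlinarith
      have hcube : k * k * k < (k + 1) * (k + 1) * (k + 1) := by nlinarith [sq_nonneg (2 * k + 1)]
      have hlt : (n - (k + 1) * (k + 1) * (k + 1)).toNat < m := by omega
      have hrec := ih _ hlt (k + 1) (c + 1) rfl (by omega)
      rw [hrec]
      have hsplit : Finset.Icc k (n - 1) = insert k (Finset.Icc (k + 1) (n - 1)) := by
        ext x; simp [Finset.mem_Icc, Finset.mem_insert]; omega
      rw [hsplit, Finset.filter_insert, if_pos hc,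
        Finset.card_insert_of_notMem (by simp only [Finset.mem_filter, Finset.mem_Icc]; omega)]
      push_cast; ring
    · rw [if_neg hc]
      have hempty : (Finset.Icc k (n - 1)).filter (fun t => t * t * t < n) = ∅ := by
        rw [Finset.filter_eq_empty_iff]
        intro t ht
        simp only [Finset.mem_Icc] at ht
        have ht0 : (0:ℤ) < t := by omega
        have h1 : k * k ≤ t * t := by nlinarith
        have h2 : k * k * k ≤ t * t * t := by nlinarith
        simp; omega
      rw [hempty]; simp

-- A's double loop counts the pairs (i, j) ∈ s × s satisfying A's tests, s = [1, n]
theorem pvFnEqCard (n : ℤ) :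
    fn n = ((((PySem.List.pyRange 1 (n + 1) 1).toFinset ×ˢ (PySem.List.pyRange 1 (n + 1) 1).toFinset).filter
      (fun x => x.1 * x.1 * x.1 = x.2 * x.2 ∧ x.1 ≤ x.2 ∧ x.1 < n ∧ x.2 < n)).card : ℤ) := by
  unfold fn
  rw [PySem.List.foldl_congr_mem _ _
      (fun c i => c + ((PySem.List.pyRange 1 (n + 1) 1).countP
        (fun j => decide (i * i * i = j * j ∧ i ≤ j ∧ i < n ∧ j < n)) : ℤ)) _
      (by
        intro acc i _
        rw [PySem.List.foldl_congr_mem _ _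
            (fun c j => if i * i * i = j * j ∧ i ≤ j ∧ i < n ∧ j < n then c + 1 else c) _
            (by intro c j _; dsimp only; split_ifs <;> tauto)]
        exact PySem.List.foldl_ite_add_one _ _ _)]
  rw [PySem.List.foldl_add, zero_add]
  have hnd : (PySem.List.pyRange 1 (n + 1) 1).Nodup := PySem.List.nodup_pyRange_one 1 (n + 1)
  rw [← List.sum_toFinset _ hnd]
  have hcount : ∀ i : ℤ, ((PySem.List.pyRange 1 (n + 1) 1).countP
      (fun j => decide (i * i * i = j * j ∧ i ≤ j ∧ i < n ∧ j < n)) : ℤ)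
      = (((PySem.List.pyRange 1 (n + 1) 1).toFinset.filter
          (fun j => i * i * i = j * j ∧ i ≤ j ∧ i < n ∧ j < n)).card : ℤ) := by
    intro i
    have h2 : ((PySem.List.pyRange 1 (n + 1) 1).filter
        (fun j => decide (i * i * i = j * j ∧ i ≤ j ∧ i < n ∧ j < n))).toFinset
        = (PySem.List.pyRange 1 (n + 1) 1).toFinset.filter
          (fun j => i * i * i = j * j ∧ i ≤ j ∧ i < n ∧ j < n) := by
      ext x; simp
    rw [← h2, List.toFinset_card_of_nodup (hnd.filter _), List.countP_eq_length_filter]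
  simp only [hcount]
  rw [Finset.card_filter, Finset.sum_product]
  rw [← Nat.cast_sum]
  congr 1
  exact Finset.sum_congr rfl fun i _ => Finset.card_filter _ _

-- the bijection k ↦ (k^2, k^3) between counted k and counted pairs
theorem pvCardEq (n : ℤ) :
    (((PySem.List.pyRange 1 (n + 1) 1).toFinset ×ˢ (PySem.List.pyRange 1 (n + 1) 1).toFinset).filter
      (fun x => x.1 * x.1 * x.1 = x.2 * x.2 ∧ x.1 ≤ x.2 ∧ x.1 < n ∧ x.2 < n)).card
    = ((Finset.Icc 1 (n - 1)).filter (fun t => t * t * t < n)).card := by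
  symm
  refine Finset.card_nbij (fun k => (k * k, k * k * k)) ?_ ?_ ?_
  · intro k hk
    simp only [Finset.coe_filter, Set.mem_setOf_eq, Finset.mem_Icc] at hk
    obtain ⟨⟨hk1, hk2⟩, hk3⟩ := hk
    simp only [Finset.coe_filter, Set.mem_setOf_eq, Finset.mem_product, List.mem_toFinset,
      PySem.List.mem_pyRange_one]
    have h1 : 1 ≤ k * k := by nlinarith
    have h2 : k * k ≤ k * k * k := by nlinarith
    refine ⟨⟨⟨h1, by omega⟩, ⟨by nlinarith, by omega⟩⟩, by ring, h2, by omega, by omega⟩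
  · intro k hk m hm he
    simp only [Finset.coe_filter, Set.mem_setOf_eq, Finset.mem_Icc] at hk hm
    have h1 : k * k = m * m := congrArg Prod.fst he
    nlinarith [hk.1.1, hm.1.1]
  · rintro ⟨i, j⟩ hij
    simp only [Finset.coe_filter, Set.mem_setOf_eq, Finset.mem_product, List.mem_toFinset,
      PySem.List.mem_pyRange_one] at hij
    obtain ⟨⟨⟨hi1, _⟩, ⟨hj1, _⟩⟩, heq, hle, hin, hjn⟩ := hij
    obtain ⟨k, hk1, hik, hjk⟩ := pvExistsSqCubeInt i j hi1 hj1 heq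
    refine ⟨k, ?_, by rw [hik, hjk]⟩
    simp only [Finset.coe_filter, Set.mem_setOf_eq, Finset.mem_Icc]
    have hkn : k * k * k < n := by omega
    have hkk : k ≤ k * k * k := by nlinarith
    exact ⟨⟨hk1, by omega⟩, hkn⟩

-- ===== VERDICT (by name: the statement is the Claim_ definition above) =====
theorem fn_spec : Claim_equal_fn := by
  intro n _
  unfold Spec_fn fn_alt
  rw [pvFnAltLoop_eq n (n - 1).toNat 1 0 rfl le_rfl, zero_add, pvFnEqCard, pvCardEq]
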